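-- pv_equiv track=rewrite | github.com/Roberadesissai/python_test | TEST.PY | is_regular_m
-- ===== SOURCE A (Python) =====
-- def is_regular_m(mat):
--   length = []
--   for i in range(len(mat)):
--     length.append(mat[i].count(1))
--   if len(set(length)) == 1:
--     return True
--   else:
--     return False
-- ===== SOURCE B (Python) =====
-- def _ones(row):
--     return sum(1 for x in row if x == 1)
--
-- def _chain(rows):
--     # recursive adjacent-pair comparison: equality is transitive, so
--     # consecutive equal counts <=> all counts equal
--     if len(rows) < 2:
--         return True
--     return _ones(rows[0]) == _ones(rows[1]) and _chain(rows[1:])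
--
-- def is_regular_m(mat):
--     return bool(mat) and _chain(mat)
-- ===== Notes on version B (the rewrite author's own statement) =====
-- stated objective: alternative
-- what changed: Replaces A's collect-all-row-counts-then-compare-set-size with a recursive adjacent-pair chain: counts 1s by a generator sum instead of list.count and checks only consecutive rows for equal counts, relying on transitivity of equality; bool(mat) handles the empty matrix.
import Mathlib
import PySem

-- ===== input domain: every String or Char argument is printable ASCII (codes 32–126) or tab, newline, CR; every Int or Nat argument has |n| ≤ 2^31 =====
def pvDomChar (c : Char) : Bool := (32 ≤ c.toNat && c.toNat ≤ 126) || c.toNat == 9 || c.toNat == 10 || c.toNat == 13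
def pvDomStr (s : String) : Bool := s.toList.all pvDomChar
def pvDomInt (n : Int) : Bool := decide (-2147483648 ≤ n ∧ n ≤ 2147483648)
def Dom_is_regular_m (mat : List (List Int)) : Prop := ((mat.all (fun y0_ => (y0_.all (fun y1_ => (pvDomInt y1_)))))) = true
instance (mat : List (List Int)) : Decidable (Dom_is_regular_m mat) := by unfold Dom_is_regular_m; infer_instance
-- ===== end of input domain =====

-- B replaces A's "collect all row counts, compare set size" with a recursive
-- adjacent-pair chain (consecutive rows' 1-counts equal, by transitivity),
-- counting via a generator-sum fold — an alternative decomposition, not faster.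

-- ===== PORT A =====
def is_regular_m (mat : List (List Int)) : Bool :=
  let length : List Int :=
    (PySem.List.pyRange 0 (mat.length : Int) 1).foldl
      (fun acc i => acc ++ [(PySem.List.count (PySem.List.pyGetD mat i []) 1 : Int)]) []
  if (PySem.Set.ofList length).length = 1 then true else false

-- ===== PORT B =====
-- _ones(row) = sum(1 for x in row if x == 1)
def bOnes (row : List Int) : Int :=
  row.foldl (fun a x => if x == 1 then a + 1 else a) 0

-- _chain(rows): len < 2 → True, else compare first two counts and recurse on the tail
def bChain : List (List Int) → Bool
  | [] => true
  | [_] => true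
  | r1 :: r2 :: rs => bOnes r1 == bOnes r2 && bChain (r2 :: rs)

-- bool(mat) and _chain(mat)
def is_regular_m_alt (mat : List (List Int)) : Bool :=
  !mat.isEmpty && bChain mat

-- ===== PRECONDITION & SPEC =====
def Spec_is_regular_m (mat : List (List Int)) (out : Bool) : Prop := out = is_regular_m_alt mat
instance (mat : List (List Int)) (out : Bool) : Decidable (Spec_is_regular_m mat out) := by unfold Spec_is_regular_m; infer_instance

-- ===== CLAIM (what is proved, stated in full; the proofs are below) =====
def Claim_equal_is_regular_m : Prop := ∀ (mat : List (List Int)), Dom_is_regular_m mat → Spec_is_regular_m mat (is_regular_m mat)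

-- ===== LEMMAS AND PROOFS =====

-- A's counts list is just the map of row-counts over the rows
theorem lenList_eq_map (mat : List (List Int)) :
    (PySem.List.pyRange 0 (mat.length : Int) 1).foldl
      (fun acc i => acc ++ [(PySem.List.count (PySem.List.pyGetD mat i []) 1 : Int)]) []
    = mat.map (fun r => (PySem.List.count r 1 : Int)) := by
  rw [PySem.List.foldl_pyRange_pyGetD' (xs := mat) (d := [])
      (f := fun acc r => acc ++ [(PySem.List.count r 1 : Int)]) (init := []) (a := 0)
      (by norm_num)]
  simpa using PySem.List.foldl_append_singleton_eq_map
    (f := fun r => (PySem.List.count r 1 : Int)) (l := mat) (acc := [])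

-- if every element equals c, folding Set.add over them leaves [c]
theorem foldl_add_const (c : Int) (cs : List Int) (h : ∀ x ∈ cs, x = c) :
    cs.foldl PySem.Set.add [c] = [c] := by
  induction cs with
  | nil => rfl
  | cons x xs ih =>
    have hx : x = c := h x (by simp)
    subst hx
    simp only [List.foldl_cons]
    have : PySem.Set.add [x] x = [x] := by simp [PySem.Set.add, PySem.Set.contains]
    rw [this]
    exact ih (fun y hy => h y (by simp [hy]))

-- the set of c :: cs is a singleton iff every element of cs equals c
theorem ofList_len_one_iff (c : Int) (cs : List Int) :
    (PySem.Set.ofList (c :: cs)).length = 1 ↔ ∀ x ∈ cs, x = c := by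
  constructor
  · intro h x hx
    have hmem : x ∈ PySem.Set.ofList (c :: cs) := by
      rw [PySem.Set.mem_ofList]; simp [hx]
    have hc : c ∈ PySem.Set.ofList (c :: cs) := by
      rw [PySem.Set.mem_ofList]; simp
    obtain ⟨a, ha⟩ := List.length_eq_one_iff.mp h
    rw [ha] at hmem hc
    simp at hmem hc
    rw [hmem, hc]
  · intro h
    have : PySem.Set.ofList (c :: cs) = [c] := by
      rw [PySem.Set.ofList_eq_foldl]
      simp only [List.foldl_cons]
      have h0 : PySem.Set.add [] c = [c] := by simp [PySem.Set.add, PySem.Set.contains]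
      rw [h0]
      exact foldl_add_const c cs h
    rw [this]
    simp

-- B's generator-sum equals Python's row.count(1)
theorem bOnes_eq_count (row : List Int) :
    bOnes row = (PySem.List.count row 1 : Int) := by
  unfold bOnes
  rw [PySem.List.foldl_beq_add_one]
  simp [PySem.List.count_eq]

-- the adjacent-pair chain from r checks that every later count equals r's
theorem bChain_cons (r : List Int) (rs : List (List Int)) :
    bChain (r :: rs) = decide (∀ s ∈ rs, bOnes s = bOnes r) := by
  induction rs generalizing r with
  | nil => simp [bChain]
  | cons s rs ih =>
    have hstep : bChain (r :: s :: rs) = (bOnes r == bOnes s && bChain (s :: rs)) := rfl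
    rw [hstep, ih]
    by_cases h : bOnes r = bOnes s
    · simp only [h, beq_self_eq_true, Bool.true_and]
      exact decide_eq_decide.mpr (by
        constructor
        · intro hall t ht
          rcases List.mem_cons.mp ht with rfl | ht'
          · rfl
          · exact hall t ht'
        · intro hall t ht
          exact hall t (by simp [ht]))
    · have hb : (bOnes r == bOnes s) = false := beq_eq_false_iff_ne.mpr h
      rw [hb, Bool.false_and]
      exact (decide_eq_false (fun hall => h (hall s (by simp)).symm)).symm

theorem is_regular_m_spec_aux (mat : List (List Int)) :
    is_regular_m mat = is_regular_m_alt mat := by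
  cases mat with
  | nil =>
    simp [is_regular_m, is_regular_m_alt, PySem.Set.ofList]
  | cons r rs =>
    simp only [is_regular_m, is_regular_m_alt, lenList_eq_map, List.map_cons,
      List.isEmpty_cons, Bool.not_false, Bool.true_and]
    rw [bChain_cons]
    by_cases h : ∀ x ∈ rs, (PySem.List.count x 1 : Int) = (PySem.List.count r 1 : Int)
    · have hall : ∀ x ∈ rs.map (fun t => (PySem.List.count t 1 : Int)),
          x = (PySem.List.count r 1 : Int) := by
        intro x hx
        obtain ⟨y, hy, rfl⟩ := List.mem_map.mp hx
        exact h y hy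
      rw [if_pos ((ofList_len_one_iff _ _).mpr hall)]
      exact (decide_eq_true (fun s hs => by
        rw [bOnes_eq_count, bOnes_eq_count]; exact h s hs)).symm
    · have hnm : ¬ ∀ x ∈ rs.map (fun t => (PySem.List.count t 1 : Int)),
          x = (PySem.List.count r 1 : Int) := by
        intro hall
        exact h (fun y hy => hall _ (List.mem_map.mpr ⟨y, hy, rfl⟩))
      rw [if_neg (fun hlen => hnm ((ofList_len_one_iff _ _).mp hlen))]
      exact (decide_eq_false (fun hall => h (fun s hs => by
        have := hall s hs
        rwa [bOnes_eq_count, bOnes_eq_count] at this))).symm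

-- ===== VERDICT (by name: the statement is the Claim_ definition above) =====
theorem is_regular_m_spec : Claim_equal_is_regular_m := by
  intro mat _
  exact is_regular_m_spec_aux mat
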